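-- pv_equiv track=rewrite | github.com/Azure/azure-cli | src/command_modules/azure-cli-batch/azure/cli/command_modules/batch/_command_type.py | _build_prefix
-- ===== SOURCE A (Python) =====
-- def _join_prefix(prefix, name):
--     """Filter certain superflous parameter name suffixes
--     from argument names.
--     :param str prefix: The potential prefix that will be filtered.
--     :param str name: The arg name to be prefixed.
--     :returns: Combined name with prefix.
--     """
--     if prefix.endswith("_specification"):
--         return prefix[:-14] + "_" + name
--     elif prefix.endswith("_patch_parameter"):
--         return prefix[:-16] + "_" + name
--     elif prefix.endswith("_update_parameter"):
--         return prefix[:-17] + "_" + name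
--     return prefix + "_" + name
--
-- def _build_prefix(arg, param, path):
--     """Recursively build a command line argument prefix from the request
--     parameter object to avoid name conflicts.
--     :param str arg: Currenct argument name.
--     :param str param: Original request parameter name.
--     :param str path: Request parameter namespace.
--     """
--     prefix_list = path.split('.')
--     if len(prefix_list) == 1:
--         return arg
--     resolved_name = _join_prefix(prefix_list[0], param)
--     if arg == resolved_name:
--         return arg
--     for prefix in prefix_list[1:]:
--         new_name = _join_prefix(prefix, param)
--         if new_name == arg:
--             return resolved_name
--         resolved_name = new_name
--     return resolved_name
-- ===== SOURCE B (Python) =====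
-- def _join_prefix(prefix, name):
--     if prefix.endswith("_specification"):
--         return prefix[:-14] + "_" + name
--     elif prefix.endswith("_patch_parameter"):
--         return prefix[:-16] + "_" + name
--     elif prefix.endswith("_update_parameter"):
--         return prefix[:-17] + "_" + name
--     return prefix + "_" + name
--
--
-- def _resolve(arg, param, resolved, rest):
--     # Recursively consume one path segment at a time from the remaining string.
--     head, sep, rest = rest.partition('.')
--     name = _join_prefix(head, param)
--     if name == arg:
--         return resolved
--     if not sep:
--         return name
--     return _resolve(arg, param, name, rest)
--
--
-- def _build_prefix(arg, param, path):
--     # Stream over the namespace string with partition('.'); no list is built.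
--     head, sep, rest = path.partition('.')
--     if not sep:
--         return arg
--     resolved = _join_prefix(head, param)
--     if arg == resolved:
--         return arg
--     return _resolve(arg, param, resolved, rest)
-- ===== Notes on version B (the rewrite author's own statement) =====
-- stated objective: alternative
-- what changed: A splits the whole path into a list and runs a fused loop carrying a running resolved name; B never builds a list: it recursively consumes the path string one segment at a time with str.partition('.'), joining and comparing as it streams.
import Mathlib
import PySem

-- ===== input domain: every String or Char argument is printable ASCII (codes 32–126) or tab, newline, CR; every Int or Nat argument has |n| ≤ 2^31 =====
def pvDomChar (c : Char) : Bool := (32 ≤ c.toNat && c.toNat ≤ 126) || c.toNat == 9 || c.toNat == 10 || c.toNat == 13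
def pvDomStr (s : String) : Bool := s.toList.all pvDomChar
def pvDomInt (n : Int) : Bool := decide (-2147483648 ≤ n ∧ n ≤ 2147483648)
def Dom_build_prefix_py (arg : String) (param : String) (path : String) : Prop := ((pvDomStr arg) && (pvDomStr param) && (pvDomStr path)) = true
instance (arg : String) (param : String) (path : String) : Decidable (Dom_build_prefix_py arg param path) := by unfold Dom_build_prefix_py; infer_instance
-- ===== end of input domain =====

-- B replaces A's split-into-list-plus-fused-loop by a recursion that streams over the
-- path string one partition('.') step at a time, never building the segment list
-- (alternative decomposition, no speed claim).

-- ===== PORT A =====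
-- _join_prefix, shared helper of both Pythons, on code-point lists (exact: endswith/slice are PySem)
def joinChars (pre : List Char) (name : List Char) : List Char :=
  if PySem.Chars.endswith pre "_specification".toList then
    PySem.Chars.slice pre none (some (-14)) ++ '_' :: name
  else if PySem.Chars.endswith pre "_patch_parameter".toList then
    PySem.Chars.slice pre none (some (-16)) ++ '_' :: name
  else if PySem.Chars.endswith pre "_update_parameter".toList then
    PySem.Chars.slice pre none (some (-17)) ++ '_' :: name
  else pre ++ '_' :: name

-- A's 'for prefix in prefix_list[1:]' loop with the running resolved_name
def loopA (arg param : List Char) (resolved : List Char) : List (List Char) → List Char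
  | [] => resolved
  | p :: ps =>
    let new_name := joinChars p param
    if new_name = arg then resolved else loopA arg param new_name ps

def build_prefix_py (arg : String) (param : String) (path : String) : String :=
  let prefix_list := PySem.Chars.splitOn path.toList ['.']
  if prefix_list.length = 1 then arg
  else
    let resolved := joinChars (prefix_list.getD 0 []) param.toList
    if arg.toList = resolved then arg
    else String.ofList (loopA arg.toList param.toList resolved prefix_list.tail)

-- ===== PORT B =====
-- s.partition('.') on code-point lists: (segment before the first '.', found?, remainder)
def partitionDot : List Char → List Char × Bool × List Char
  | [] => ([], false, [])
  | c :: rest =>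
    if c = '.' then ([], true, rest)
    else
      let (h, f, r) := partitionDot rest
      (c :: h, f, r)

-- cited by resolveB's decreasing_by: when a '.' is found, the remainder is shorter
lemma partitionDot_lt : ∀ (s : List Char), (partitionDot s).2.1 = true →
    (partitionDot s).2.2.length < s.length := by
  intro s
  induction s with
  | nil => simp [partitionDot]
  | cons c rest ih =>
    by_cases hc : c = '.'
    · simp [partitionDot, hc]
    · simp only [partitionDot, if_neg hc]
      intro hf
      have := ih hf
      simpa using Nat.lt_succ_of_lt this

-- B's _resolve: consume one path segment at a time from the remaining string
def resolveB (arg param resolved rest : List Char) : List Char :=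
  let p := partitionDot rest
  let name := joinChars p.1 param
  if name = arg then resolved
  else if hf : p.2.1 = false then name
  else resolveB arg param name p.2.2
termination_by rest.length
decreasing_by
  exact partitionDot_lt rest (by simpa using hf)

def build_prefix_py_alt (arg : String) (param : String) (path : String) : String :=
  let p := partitionDot path.toList
  if p.2.1 = false then arg
  else
    let resolved := joinChars p.1 param.toList
    if arg.toList = resolved then arg
    else String.ofList (resolveB arg.toList param.toList resolved p.2.2)

-- ===== PRECONDITION & SPEC =====
def Spec_build_prefix_py (arg : String) (param : String) (path : String) (out : String) : Prop := out = build_prefix_py_alt arg param path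
instance (arg : String) (param : String) (path : String) (out : String) : Decidable (Spec_build_prefix_py arg param path out) := by unfold Spec_build_prefix_py; infer_instance

-- ===== CLAIM =====
def Claim_equal_build_prefix_py : Prop := ∀ (arg : String) (param : String) (path : String), Dom_build_prefix_py arg param path → Spec_build_prefix_py arg param path (build_prefix_py arg param path)

-- ===== LEMMAS AND PROOFS =====

lemma splitOn_go_ne_nil (sep : List Char) :
    ∀ (fuel : Nat) (l cur : List Char) (acc : List (List Char)),
      PySem.Chars.splitOn.go sep fuel l cur acc ≠ [] := by
  intro fuel
  induction fuel with
  | zero => intro l cur acc; simp [PySem.Chars.splitOn.go]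
  | succ n ih =>
    intro l cur acc
    cases l with
    | nil => simp [PySem.Chars.splitOn.go]
    | cons c rest =>
      rw [PySem.Chars.splitOn.go]
      split
      · exact ih _ _ _
      · exact ih _ _ _

lemma splitOn_ne_nil (s sep : List Char) : PySem.Chars.splitOn s sep ≠ [] := by
  unfold PySem.Chars.splitOn
  exact splitOn_go_ne_nil sep _ _ _ _

-- splitOn on '.' in terms of partitionDot
lemma splitOn_go_partitionDot :
    ∀ (l : List Char) (fuel : Nat) (cur : List Char) (acc : List (List Char)),
      l.length < fuel →
      PySem.Chars.splitOn.go ['.'] fuel l cur acc =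
        acc.reverse ++
          (if (partitionDot l).2.1 then
            (cur.reverse ++ (partitionDot l).1) :: PySem.Chars.splitOn (partitionDot l).2.2 ['.']
          else [cur.reverse ++ (partitionDot l).1]) := by
  intro l
  induction l with
  | nil =>
    intro fuel cur acc hf
    cases fuel with
    | zero => omega
    | succ n => simp [PySem.Chars.splitOn.go, partitionDot]
  | cons c rest ih =>
    intro fuel cur acc hf
    cases fuel with
    | zero => omega
    | succ n =>
      rw [PySem.Chars.splitOn.go]
      by_cases hc : c = '.'
      · have hpre : List.isPrefixOf ['.'] (c :: rest) = true := by simp [List.isPrefixOf, hc]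
        rw [if_pos hpre]
        have hrec := ih n [] (cur.reverse :: acc) (by simp at hf ⊢; omega)
        have hdrop : List.drop (['.'] : List Char).length (c :: rest) = rest := by simp
        rw [hdrop, hrec]
        have hsplit : PySem.Chars.splitOn rest ['.'] =
            (if (partitionDot rest).2.1 then
              (partitionDot rest).1 :: PySem.Chars.splitOn (partitionDot rest).2.2 ['.']
            else [(partitionDot rest).1]) := by
          unfold PySem.Chars.splitOn
          have := ih (rest.length + 1) [] [] (by omega)
          simpa using this
        simp [partitionDot, hc, hsplit]
      · have hpre : List.isPrefixOf ['.'] (c :: rest) = false := by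
          simp [List.isPrefixOf]
          exact fun h => hc h.symm
        rw [if_neg (by simp [hpre])]
        have hrec := ih n (c :: cur) acc (by simp at hf ⊢; omega)
        rw [hrec]
        simp only [partitionDot, if_neg hc]
        cases hp : partitionDot rest with
        | mk h fr =>
          cases fr with
          | mk f r => by_cases hfb : f <;> simp [hfb]

lemma splitOn_partitionDot (s : List Char) :
    PySem.Chars.splitOn s ['.'] =
      (if (partitionDot s).2.1 then
        (partitionDot s).1 :: PySem.Chars.splitOn (partitionDot s).2.2 ['.']
      else [(partitionDot s).1]) := by
  unfold PySem.Chars.splitOn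
  have := splitOn_go_partitionDot s (s.length + 1) [] [] (by omega)
  simpa using this

-- A's loop over the remaining split segments equals B's streaming recursion
lemma loopA_eq_resolveB (arg param : List Char) :
    ∀ (r : List Char) (resolved : List Char),
      loopA arg param resolved (PySem.Chars.splitOn r ['.']) =
        resolveB arg param resolved r := by
  intro r
  induction hn : r.length using Nat.strong_induction_on generalizing r with
  | _ n ih =>
  intro resolved
  rw [splitOn_partitionDot r, resolveB]
  by_cases hf : (partitionDot r).2.1
  · rw [if_pos hf]
    simp only [loopA]
    by_cases ha : joinChars (partitionDot r).1 param = arg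
    · simp [ha, hf]
    · rw [if_neg ha]
      rw [ih (partitionDot r).2.2.length (by rw [← hn]; exact partitionDot_lt r hf) _ rfl]
      simp [ha, hf]
  · rw [if_neg hf]
    simp only [loopA]
    by_cases ha : joinChars (partitionDot r).1 param = arg
    · simp [ha, hf]
    · simp [ha, hf]

-- ===== VERDICT =====
theorem build_prefix_py_spec : Claim_equal_build_prefix_py := by
  intro arg param path _
  unfold Spec_build_prefix_py build_prefix_py build_prefix_py_alt
  rw [splitOn_partitionDot path.toList]
  by_cases hf : (partitionDot path.toList).2.1
  · rw [if_pos hf]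
    have hne := splitOn_ne_nil (partitionDot path.toList).2.2 ['.']
    have hlen : ((partitionDot path.toList).1 ::
        PySem.Chars.splitOn (partitionDot path.toList).2.2 ['.']).length ≠ 1 := by
      cases h : PySem.Chars.splitOn (partitionDot path.toList).2.2 ['.'] with
      | nil => exact absurd h hne
      | cons x xs => simp
    rw [if_neg hlen]
    simp only [List.getD_cons_zero, List.tail_cons, hf, if_neg (by simp : ¬ (true = false))]
    by_cases ha : arg.toList = joinChars (partitionDot path.toList).1 param.toList
    · simp [ha]
    · rw [if_neg ha, if_neg ha]
      rw [loopA_eq_resolveB]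
  · rw [if_neg hf]
    simp [hf]
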